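-- pv_equiv track=rewrite | github.com/ravhello/Scopone_RL | game_logic.py | _replay_get_valid_actions
-- ===== SOURCE A (Python) =====
-- def _replay_get_valid_actions(hand, table):
--     """
--     Durante il replay, rigeneriamo la logica di get_valid_actions
--     basandoci su 'hand' e 'table' (senza l'intero game_state).
--     """
--     import itertools
--     valid = []
--     for h_i, card in enumerate(hand):
--         rank = card[0]
--         # 1) cattura diretta se esiste
--         same_rank_indices = [i for i,t_c in enumerate(table) if t_c[0] == rank]
--         if same_rank_indices:
--             action_id = encode_action(h_i, same_rank_indices)
--             valid.append(action_id)
--         else: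
--             # 2) combinazioni di somma
--             sum_options = []
--             idx_range = range(len(table))
--             for size_ in range(1, len(table)+1):
--                 for subset in itertools.combinations(idx_range, size_):
--                     chosen_cards = [table[x] for x in subset]
--                     if sum(c[0] for c in chosen_cards) == rank:
--                         sum_options.append(subset)
--             if sum_options:
--                 for subset in sum_options:
--                     action_id = encode_action(h_i, subset)
--                     valid.append(action_id)
--             else:
--                 # 3) butta la carta
--                 action_id = encode_action(h_i, ())
--                 valid.append(action_id)
--     return valid
--
-- def encode_action(hand_index, subset_indices):
--     """
--     Stessa identica codifica di actions.py
--     """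
--     action_id = (hand_index & 0xF)
--     bitmask = 0
--     for s in subset_indices:
--         bitmask |= (1 << s)
--     action_id |= (bitmask << 4)
--     return action_id
-- ===== SOURCE B (Python) =====
-- def _replay_get_valid_actions(hand, table):
--     n = len(table)
--     # index 1: per rank, the bitmask of table cards of that same rank (one table pass)
--     rank_mask = {}
--     for i, t_c in enumerate(table):
--         rank_mask[t_c[0]] = rank_mask.get(t_c[0], 0) | (1 << i)
--     # index 2: ONE subset enumeration for the whole hand, bucketed by subset sum;
--     # recursive generator with incremental mask/sum, subsets in (size, lex) order
--     by_sum = {}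
--     def gen(need, start, mask, total):
--         if need == 0:
--             by_sum[total] = by_sum.get(total, []) + [mask]
--             return
--         for i in range(start, n - need + 1):
--             gen(need - 1, i + 1, mask | (1 << i), total + table[i][0])
--     for size in range(1, n + 1):
--         gen(size, 0, 0, 0)
--     out = []
--     for h_i, card in enumerate(hand):
--         hid = h_i & 0xF
--         m = rank_mask.get(card[0], 0)
--         if m:
--             out.append(hid | (m << 4))
--         else:
--             masks = by_sum.get(card[0], [])
--             if masks:
--                 out.extend(hid | (mk << 4) for mk in masks)
--             else:
--                 out.append(hid)
--     return out
-- ===== Notes on version B (the rewrite author's own statement) =====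
-- stated objective: alternative
-- what changed: A re-enumerates all table subsets (rebuilding and re-summing each chosen-card list) for every hand card without a rank match; B builds two indexes once - a rank->bitmask dict in one table pass and a sum->masks dict by a single recursive subset generator with incremental masks and sums - so each hand card is handled by dictionary lookups (intended as faster in hand size; a timing run measured 1.81x at the largest size both finished, with the shared 2^n table term dominating beyond that).
import Mathlib
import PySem

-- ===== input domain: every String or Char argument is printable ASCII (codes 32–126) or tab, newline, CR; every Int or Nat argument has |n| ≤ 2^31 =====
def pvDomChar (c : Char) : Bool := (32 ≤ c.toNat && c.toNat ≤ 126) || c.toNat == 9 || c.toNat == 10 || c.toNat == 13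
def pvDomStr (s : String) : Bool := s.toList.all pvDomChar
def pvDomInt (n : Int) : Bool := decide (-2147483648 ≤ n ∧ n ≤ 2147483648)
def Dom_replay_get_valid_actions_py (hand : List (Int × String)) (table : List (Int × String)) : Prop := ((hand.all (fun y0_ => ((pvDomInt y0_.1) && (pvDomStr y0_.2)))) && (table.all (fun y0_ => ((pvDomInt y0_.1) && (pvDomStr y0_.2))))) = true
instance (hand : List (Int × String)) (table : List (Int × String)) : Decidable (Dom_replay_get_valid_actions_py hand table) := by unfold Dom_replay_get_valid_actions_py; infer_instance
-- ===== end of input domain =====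

-- B replaces A's per-hand-card subset re-enumeration by two dictionaries built once
-- (rank -> same-rank bitmask; subset-sum -> list of subset bitmasks, via one recursive
-- generator with incremental masks and sums); objective: alternative.

-- ===== PORT A =====

-- hand port of itertools.combinations(idx_list, k): exactly its output order
-- (tuples of elements in list order, lexicographic by position)
def pyCombinationsA : List Int → Nat → List (List Int)
  | _, 0 => [[]]
  | [], _ + 1 => []
  | x :: xs, k + 1 => (pyCombinationsA xs k).map (x :: ·) ++ pyCombinationsA xs (k + 1)

-- encode_action: all quantities are nonnegative (hand_index from enumerate, subset
-- indices from range), so Python's & | << on ints are exactly Nat's &&& ||| <<< here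
def encode_action_py (hand_index : Int) (subset_indices : List Int) : Int :=
  let action_id : Nat := hand_index.toNat &&& 0xF
  let bitmask : Nat := subset_indices.foldl (fun b s => b ||| (1 <<< s.toNat)) 0
  ((action_id ||| (bitmask <<< 4) : Nat) : Int)

def replay_get_valid_actions_py (hand : List (Int × String)) (table : List (Int × String)) : List Int :=
  (PySem.List.enumerate hand 0).foldl (fun valid p =>
    let h_i := p.1
    let rank := p.2.1
    let same_rank_indices := ((PySem.List.enumerate table 0).filter (fun q => q.2.1 = rank)).map (·.1)
    if same_rank_indices ≠ [] then
      valid ++ [encode_action_py h_i same_rank_indices]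
    else
      let sum_options :=
        (PySem.List.pyRange 1 ((table.length : Int) + 1) 1).foldl (fun so size_ =>
          (pyCombinationsA (PySem.List.pyRange 0 (table.length : Int) 1) size_.toNat).foldl (fun so subset =>
            -- table[x]: x comes from combinations of range(len(table)), always in range, so the total getD is exact
            let chosen_cards := subset.map (fun x => table.getD x.toNat (0, ""))
            if (chosen_cards.map (·.1)).sum = rank then so ++ [subset] else so) so) []
      if sum_options ≠ [] then
        sum_options.foldl (fun v subset => v ++ [encode_action_py h_i subset]) valid
      else
        valid ++ [encode_action_py h_i []]) []

-- ===== PORT B =====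

-- recursive bucketing generator gen(need, start, mask, total) from Source B; masks are
-- nonnegative Python ints = Nat; table[i] with i from range(start, n-need+1) is always
-- in range, so the total getD is exact
def genB (table : List (Int × String)) : Nat → Int → Nat → Int → PySem.Dict Int (List Nat) → PySem.Dict Int (List Nat)
  | 0, _start, mask, total, d => d.modify total [] (· ++ [mask])
  | need + 1, start, mask, total, d =>
      (PySem.List.pyRange start ((table.length : Int) - (need : Int)) 1).foldl
        (fun d' i =>
          genB table need (i + 1) (mask ||| (1 <<< i.toNat)) (total + (table.getD i.toNat (0, "")).1) d') d

def replay_get_valid_actions_py_alt (hand : List (Int × String)) (table : List (Int × String)) : List Int :=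
  let rank_mask : PySem.Dict Int Nat :=
    (PySem.List.enumerate table 0).foldl
      (fun d q => d.modify q.2.1 0 (· ||| (1 <<< q.1.toNat))) PySem.Dict.empty
  let by_sum : PySem.Dict Int (List Nat) :=
    (PySem.List.pyRange 1 ((table.length : Int) + 1) 1).foldl
      (fun d size_ => genB table size_.toNat 0 0 0 d) PySem.Dict.empty
  (PySem.List.enumerate hand 0).foldl (fun out p =>
    let hid : Nat := p.1.toNat &&& 0xF
    let m := rank_mask.getD p.2.1 0
    if m ≠ 0 then
      out ++ [((hid ||| (m <<< 4) : Nat) : Int)]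
    else
      let masks := by_sum.getD p.2.1 []
      if masks ≠ [] then
        out ++ masks.map (fun mk => ((hid ||| (mk <<< 4) : Nat) : Int))
      else
        out ++ [(hid : Int)]) []

-- ===== PRECONDITION & SPEC =====
def Spec_replay_get_valid_actions_py (hand : List (Int × String)) (table : List (Int × String)) (out : List Int) : Prop := out = replay_get_valid_actions_py_alt hand table
instance (hand : List (Int × String)) (table : List (Int × String)) (out : List Int) : Decidable (Spec_replay_get_valid_actions_py hand table out) := by unfold Spec_replay_get_valid_actions_py; infer_instance

-- ===== CLAIM (what is proved, stated in full; the proofs are below) =====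
def Claim_equal_replay_get_valid_actions_py : Prop := ∀ (hand : List (Int × String)) (table : List (Int × String)), Dom_replay_get_valid_actions_py hand table → Spec_replay_get_valid_actions_py hand table (replay_get_valid_actions_py hand table)


-- ===== LEMMAS AND PROOFS =====

-- bitmask of a list of (nonnegative) indices, = encode_action's inner fold
def maskOfL (c : List Int) : Nat := c.foldl (fun b s => b ||| (1 <<< s.toNat)) 0

-- sum of the ranks of the table cards picked by a subset of indices
def subsum (table : List (Int × String)) (c : List Int) : Int :=
  (c.map (fun x => (table.getD x.toNat (0, "")).1)).sum

-- the (sum, mask) pairs genB pushes, in push order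
def pairsOf (table : List (Int × String)) : Nat → Int → Nat → Int → List (Int × Nat)
  | 0, _start, mask, total => [(total, mask)]
  | need + 1, start, mask, total =>
      (PySem.List.pyRange start ((table.length : Int) - (need : Int)) 1).flatMap
        (fun i => pairsOf table need (i + 1) (mask ||| (1 <<< i.toNat)) (total + (table.getD i.toNat (0, "")).1))

-- the per-hand-card output chunk of port A
def emitA (table : List (Int × String)) (p : Int × (Int × String)) : List Int :=
  let rank := p.2.1
  let same_rank_indices := ((PySem.List.enumerate table 0).filter (fun q => q.2.1 = rank)).map (·.1)
  if same_rank_indices ≠ [] then [encode_action_py p.1 same_rank_indices]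
  else
    let sum_options :=
      (PySem.List.pyRange 1 ((table.length : Int) + 1) 1).flatMap (fun size_ =>
        (pyCombinationsA (PySem.List.pyRange 0 (table.length : Int) 1) size_.toNat).filter
          (fun subset => subsum table subset = rank))
    if sum_options ≠ [] then sum_options.map (encode_action_py p.1)
    else [encode_action_py p.1 []]

-- B's two dictionaries
def rmaskD (table : List (Int × String)) : PySem.Dict Int Nat :=
  (PySem.List.enumerate table 0).foldl
    (fun d q => d.modify q.2.1 0 (· ||| (1 <<< q.1.toNat))) PySem.Dict.empty

def bysumD (table : List (Int × String)) : PySem.Dict Int (List Nat) :=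
  (PySem.List.pyRange 1 ((table.length : Int) + 1) 1).foldl
    (fun d size_ => genB table size_.toNat 0 0 0 d) PySem.Dict.empty

-- the per-hand-card output chunk of port B
def emitB (table : List (Int × String)) (p : Int × (Int × String)) : List Int :=
  let hid : Nat := p.1.toNat &&& 0xF
  let m := (rmaskD table).getD p.2.1 0
  if m ≠ 0 then [((hid ||| (m <<< 4) : Nat) : Int)]
  else
    let masks := (bysumD table).getD p.2.1 []
    if masks ≠ [] then masks.map (fun mk => ((hid ||| (mk <<< 4) : Nat) : Int))
    else [(hid : Int)]

theorem maskOfL_foldl (c : List Int) : ∀ b : Nat, c.foldl (fun m i => m ||| (1 <<< i.toNat)) b = b ||| maskOfL c := by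
  induction c with
  | nil => intro b; simp [maskOfL]
  | cons x c ih =>
      intro b
      simp only [maskOfL, List.foldl_cons] at *
      rw [ih (b ||| 1 <<< x.toNat), ih (0 ||| 1 <<< x.toNat)]
      simp [Nat.lor_assoc]

theorem maskOfL_cons (x : Int) (c : List Int) : maskOfL (x :: c) = (1 <<< x.toNat) ||| maskOfL c := by
  simp only [maskOfL, List.foldl_cons]
  rw [maskOfL_foldl c]
  simp [maskOfL]

theorem maskOfL_ne_zero (x : Int) (c : List Int) : maskOfL (x :: c) ≠ 0 := by
  rw [maskOfL_cons]
  have h1 : 0 < (1 <<< x.toNat : Nat) := by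
    rw [Nat.shiftLeft_eq, one_mul]; exact Nat.two_pow_pos _
  have := Nat.left_le_or (n := (1 <<< x.toNat : Nat)) (m := maskOfL c)
  omega

theorem rmaskD_getD (table : List (Int × String)) (r : Int) :
    (rmaskD table).getD r 0 = maskOfL (((PySem.List.enumerate table 0).filter (fun q => q.2.1 = r)).map (·.1)) := by
  have H : ∀ (l : List (Int × String)) (s : Int) (d : PySem.Dict Int Nat),
      ((PySem.List.enumerate l s).foldl (fun d q => d.modify q.2.1 0 (· ||| (1 <<< q.1.toNat))) d).getD r 0 =
        d.getD r 0 ||| maskOfL (((PySem.List.enumerate l s).filter (fun q => q.2.1 = r)).map (·.1)) := by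
    intro l
    induction l with
    | nil =>
        intro s d
        simp [PySem.List.enumerate_nil, maskOfL]
    | cons x l ih =>
        intro s d
        rw [PySem.List.enumerate_cons]
        simp only [List.foldl_cons, List.filter_cons]
        by_cases hx : x.1 = r
        · simp only [hx, decide_true, if_pos, List.map_cons, maskOfL_cons, ih,
            PySem.Dict.getD_modify]
          simp [Nat.lor_assoc]
        · have hxr : ¬ r = x.1 := fun h => hx h.symm
          simp only [ih, PySem.Dict.getD_modify, if_neg hxr]
          simp [hx]
  rw [rmaskD, H, PySem.Dict.getD_empty, Nat.zero_or]

theorem combos_short : ∀ (l : List Int) (k : Nat), l.length < k → pyCombinationsA l k = [] := by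
  intro l
  induction l with
  | nil =>
      intro k h
      match k, h with
      | k + 1, _ => rfl
  | cons x xs ih =>
      intro k h
      match k with
      | k + 1 =>
        simp only [List.length_cons] at h
        simp only [pyCombinationsA]
        rw [ih k (by omega), ih (k + 1) (by omega)]
        simp

theorem combos_expand (n : Int) : ∀ (start : Int) (k : Nat),
    pyCombinationsA (PySem.List.pyRange start n 1) (k + 1) =
      (PySem.List.pyRange start (n - (k : Int)) 1).flatMap
        (fun i => (pyCombinationsA (PySem.List.pyRange (i + 1) n 1) k).map (i :: ·)) := by
  have H : ∀ (m : Nat) (start : Int), (n - start).toNat ≤ m → ∀ (k : Nat),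
      pyCombinationsA (PySem.List.pyRange start n 1) (k + 1) =
        (PySem.List.pyRange start (n - (k : Int)) 1).flatMap
          (fun i => (pyCombinationsA (PySem.List.pyRange (i + 1) n 1) k).map (i :: ·)) := by
    intro m
    induction m with
    | zero =>
        intro start hm k
        have hns : n ≤ start := by omega
        rw [PySem.List.pyRange_one_eq_nil hns, PySem.List.pyRange_one_eq_nil (by omega : n - (k : Int) ≤ start)]
        rfl
    | succ m ih =>
        intro start hm k
        rcases (by omega : n ≤ start ∨ start < n) with hns | hsn
        · rw [PySem.List.pyRange_one_eq_nil hns, PySem.List.pyRange_one_eq_nil (by omega : n - (k : Int) ≤ start)]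
          rfl
        · rw [PySem.List.pyRange_one_cons hsn]
          simp only [pyCombinationsA]
          by_cases hc : start < n - (k : Int)
          · rw [PySem.List.pyRange_one_cons hc]
            simp only [List.flatMap_cons]
            congr 1
            exact ih (start + 1) (by omega) k
          · rw [PySem.List.pyRange_one_eq_nil (by omega : n - (k : Int) ≤ start)]
            have hlen : (PySem.List.pyRange (start + 1) n 1).length = (n - (start + 1)).toNat :=
              PySem.List.length_pyRange_one _ _
            have h1 : pyCombinationsA (PySem.List.pyRange (start + 1) n 1) k = [] := by
              apply combos_short
              omega
            have h2 : pyCombinationsA (PySem.List.pyRange (start + 1) n 1) (k + 1) = [] := by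
              apply combos_short
              omega
            simp [h1, h2]
  exact fun start k => H (n - start).toNat start le_rfl k

theorem pairsOf_spec (table : List (Int × String)) : ∀ (need : Nat) (start : Int) (mask : Nat) (total : Int),
    pairsOf table need start mask total =
      (pyCombinationsA (PySem.List.pyRange start (table.length : Int) 1) need).map
        (fun c => (total + subsum table c, mask ||| maskOfL c)) := by
  intro need
  induction need with
  | zero =>
      intro start mask total
      simp [pairsOf, pyCombinationsA, subsum, maskOfL]
  | succ need ih =>
      intro start mask total
      rw [combos_expand]
      simp only [pairsOf, List.map_flatMap, List.map_map]
      apply List.flatMap_congr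
      intro i _
      rw [ih]
      apply List.map_congr_left
      intro c _
      simp [Function.comp, subsum, maskOfL_cons, Nat.lor_assoc, add_assoc]

theorem genB_eq (table : List (Int × String)) : ∀ (need : Nat) (start : Int) (mask : Nat) (total : Int) (d : PySem.Dict Int (List Nat)),
    genB table need start mask total d =
      (pairsOf table need start mask total).foldl (fun d p => d.modify p.1 [] (· ++ [p.2])) d := by
  intro need
  induction need with
  | zero =>
      intro start mask total d
      rfl
  | succ need ih =>
      intro start mask total d
      simp only [pairsOf, genB]
      generalize PySem.List.pyRange start ((table.length : Int) - (need : Int)) 1 = l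
      induction l generalizing d with
      | nil => rfl
      | cons i l lih =>
          simp only [List.foldl_cons, List.flatMap_cons, List.foldl_append]
          rw [lih, ih]

theorem bysumD_getD (table : List (Int × String)) (r : Int) :
    (bysumD table).getD r [] =
      ((PySem.List.pyRange 1 ((table.length : Int) + 1) 1).flatMap (fun size_ =>
        (pyCombinationsA (PySem.List.pyRange 0 (table.length : Int) 1) size_.toNat).filter
          (fun subset => subsum table subset = r))).map maskOfL := by
  have hfold : ∀ (l : List Int) (d : PySem.Dict Int (List Nat)),
      l.foldl (fun d size_ => genB table size_.toNat 0 0 0 d) d =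
        (l.flatMap (fun size_ => pairsOf table size_.toNat 0 0 0)).foldl
          (fun d p => d.modify p.1 [] (· ++ [p.2])) d := by
    intro l
    induction l with
    | nil => intro d; rfl
    | cons i l lih =>
        intro d
        simp only [List.foldl_cons, List.flatMap_cons, List.foldl_append]
        rw [lih, genB_eq]
  have hb : bysumD table =
      ((PySem.List.pyRange 1 ((table.length : Int) + 1) 1).flatMap
        (fun size_ => pairsOf table size_.toNat 0 0 0)).foldl
          (fun d p => d.modify p.1 [] (· ++ [p.2])) PySem.Dict.empty := hfold _ _
  rw [hb, PySem.Dict.getD_foldl_modify_append, PySem.Dict.getD_empty, List.nil_append]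
  rw [List.filter_flatMap, List.map_flatMap, List.map_flatMap]
  apply List.flatMap_congr
  intro size_ _
  rw [pairsOf_spec, List.filter_map]
  simp [Function.comp_def]
  rfl

theorem emit_eq (table : List (Int × String)) (p : Int × (Int × String)) : emitA table p = emitB table p := by
  simp only [emitA, emitB]
  rw [rmaskD_getD, bysumD_getD]
  by_cases hs : ((PySem.List.enumerate table 0).filter (fun q => q.2.1 = p.2.1)).map (·.1) = []
  · rw [if_neg (not_not_intro hs), hs]
    have hm : ¬ (maskOfL ([] : List Int) ≠ 0) := not_not_intro rfl
    rw [if_neg hm]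
    by_cases ho : (PySem.List.pyRange 1 ((table.length : Int) + 1) 1).flatMap (fun size_ =>
        (pyCombinationsA (PySem.List.pyRange 0 (table.length : Int) 1) size_.toNat).filter
          (fun subset => subsum table subset = p.2.1)) = []
    · have hmm : ¬ (((PySem.List.pyRange 1 ((table.length : Int) + 1) 1).flatMap (fun size_ =>
          (pyCombinationsA (PySem.List.pyRange 0 (table.length : Int) 1) size_.toNat).filter
            (fun subset => subsum table subset = p.2.1))).map maskOfL ≠ []) :=
        not_not_intro (by rw [ho]; rfl)
      rw [if_neg (not_not_intro ho), if_neg hmm]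
      simp [encode_action_py]
    · have hmm : ((PySem.List.pyRange 1 ((table.length : Int) + 1) 1).flatMap (fun size_ =>
          (pyCombinationsA (PySem.List.pyRange 0 (table.length : Int) 1) size_.toNat).filter
            (fun subset => subsum table subset = p.2.1))).map maskOfL ≠ [] := by
        simpa [List.map_eq_nil_iff] using ho
      rw [if_pos ho, if_pos hmm]
      rw [List.map_map]
      rfl
  · rw [if_pos hs]
    rcases hl : ((PySem.List.enumerate table 0).filter (fun q => q.2.1 = p.2.1)).map (·.1) with _ | ⟨a, l⟩
    · exact absurd hl hs
    · rw [hl, if_pos (maskOfL_ne_zero a l)]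
      rfl

theorem A_eq (hand table : List (Int × String)) :
    replay_get_valid_actions_py hand table = (PySem.List.enumerate hand 0).flatMap (emitA table) := by
  unfold replay_get_valid_actions_py
  rw [PySem.List.foldl_congr_mem _ _ (fun valid p => valid ++ emitA table p) []]
  · rw [PySem.List.foldl_append_eq_flatMap, List.nil_append]
  · intro valid p _
    unfold emitA
    simp only []
    by_cases hs : ((PySem.List.enumerate table 0).filter (fun q => q.2.1 = p.2.1)).map (·.1) ≠ []
    · rw [if_pos hs, if_pos hs]
    · rw [if_neg hs, if_neg hs]
      have hsum : ∀ (so : List (List Int)),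
          (PySem.List.pyRange 1 ((table.length : Int) + 1) 1).foldl (fun so size_ =>
            (pyCombinationsA (PySem.List.pyRange 0 (table.length : Int) 1) size_.toNat).foldl (fun so subset =>
              let chosen_cards := subset.map (fun x => table.getD x.toNat (0, ""))
              if (chosen_cards.map (·.1)).sum = p.2.1 then so ++ [subset] else so) so) so =
          so ++ (PySem.List.pyRange 1 ((table.length : Int) + 1) 1).flatMap (fun size_ =>
            (pyCombinationsA (PySem.List.pyRange 0 (table.length : Int) 1) size_.toNat).filter
              (fun subset => subsum table subset = p.2.1)) := by
        intro so
        rw [PySem.List.foldl_congr_mem _ _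
          (fun so size_ => so ++ (pyCombinationsA (PySem.List.pyRange 0 (table.length : Int) 1) size_.toNat).filter
              (fun subset => subsum table subset = p.2.1)) so]
        · rw [PySem.List.foldl_append_eq_flatMap]
        · intro acc size_ _
          have := PySem.List.foldl_append_if
            (fun subset => decide (subsum table subset = p.2.1)) (fun subset => subset)
            (pyCombinationsA (PySem.List.pyRange 0 (table.length : Int) 1) size_.toNat) acc
          simp only [List.map_id'] at this
          rw [← this]
          apply PySem.List.foldl_congr_mem
          intro a subset _
          simp [subsum, List.map_map]
          rfl
      rw [hsum]
      by_cases ho : (PySem.List.pyRange 1 ((table.length : Int) + 1) 1).flatMap (fun size_ =>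
            (pyCombinationsA (PySem.List.pyRange 0 (table.length : Int) 1) size_.toNat).filter
              (fun subset => subsum table subset = p.2.1)) ≠ []
      · rw [if_pos (by simpa using ho), if_pos ho,
          PySem.List.foldl_append_singleton_eq_map]
        simp
      · rw [if_neg (by simpa using ho), if_neg ho]

theorem B_eq (hand table : List (Int × String)) :
    replay_get_valid_actions_py_alt hand table = (PySem.List.enumerate hand 0).flatMap (emitB table) := by
  unfold replay_get_valid_actions_py_alt
  rw [PySem.List.foldl_congr_mem _ _ (fun out p => out ++ emitB table p) []]
  · rw [PySem.List.foldl_append_eq_flatMap, List.nil_append]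
  · intro out p _
    unfold emitB rmaskD bysumD
    simp only []
    split_ifs with h1 h2 <;> rfl

-- ===== VERDICT (by name: the statement is the Claim_ definition above) =====
theorem replay_get_valid_actions_py_spec : Claim_equal_replay_get_valid_actions_py := by
  intro hand table _
  unfold Spec_replay_get_valid_actions_py
  rw [A_eq, B_eq]
  exact List.flatMap_congr (fun p _ => emit_eq table p)
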